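-- pv_equiv track=rewrite | github.com/singe/domain-probe | domain_probe.py | iter_candidate_urls
-- ===== SOURCE A (Python) =====
-- import itertools
-- from typing import Iterable, Iterator, Sequence
--
-- def expand_question_marks(pattern: str, wildcard_tokens: Sequence[str]) -> Iterator[str]:
--     positions = [idx for idx, char in enumerate(pattern) if char == "?"]
--     if not positions:
--         yield pattern
--         return
--
--     for combo in itertools.product(wildcard_tokens, repeat=len(positions)):
--         parts: list[str] = []
--         prev = 0
--         for pos, replacement in zip(positions, combo):
--             parts.append(pattern[prev:pos])
--             parts.append(replacement)
--             prev = pos + 1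
--         parts.append(pattern[prev:])
--         yield "".join(parts)
--
-- def iter_candidate_urls(
--     pattern: str,
--     fuzz_values: Iterable[str],
--     wildcard_tokens: Sequence[str],
-- ) -> Iterator[str]:
--     has_fuzz = "FUZZ" in pattern
--     if has_fuzz and not fuzz_values:
--         raise ValueError("URL pattern contains FUZZ but no wordlist was supplied")
--
--     base_iterable: Iterable[str]
--     if has_fuzz:
--         base_iterable = (pattern.replace("FUZZ", value) for value in fuzz_values)
--     else:
--         base_iterable = [pattern]
--
--     seen: set[str] = set()
--     for base in base_iterable:
--         for candidate in expand_question_marks(base, wildcard_tokens):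
--             if candidate in seen:
--                 continue
--             seen.add(candidate)
--             yield candidate
-- ===== SOURCE B (Python) =====
-- def _expand_scan(pattern, wildcard_tokens):
--     partials = [""]
--     for ch in pattern:
--         if ch == "?":
--             partials = [p + tok for p in partials for tok in wildcard_tokens]
--         else:
--             partials = [p + ch for p in partials]
--     return partials
--
--
-- def iter_candidate_urls(pattern, fuzz_values, wildcard_tokens):
--     has_fuzz = "FUZZ" in pattern
--     if has_fuzz and not fuzz_values:
--         raise ValueError("URL pattern contains FUZZ but no wordlist was supplied")
--
--     if has_fuzz:
--         bases = [pattern.replace("FUZZ", value) for value in fuzz_values]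
--     else:
--         bases = [pattern]
--
--     seen = set()
--     for base in bases:
--         for candidate in _expand_scan(base, wildcard_tokens):
--             if candidate not in seen:
--                 seen.add(candidate)
--                 yield candidate
-- ===== Notes on version B (the rewrite author's own statement) =====
-- stated objective: alternative
-- what changed: The '?'-expansion no longer collects '?' positions and enumerates itertools.product combinations reassembled via slices; instead it scans the pattern once left-to-right maintaining a list of partial strings, extending every partial by the literal char or by each wildcard token.
import Mathlib
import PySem

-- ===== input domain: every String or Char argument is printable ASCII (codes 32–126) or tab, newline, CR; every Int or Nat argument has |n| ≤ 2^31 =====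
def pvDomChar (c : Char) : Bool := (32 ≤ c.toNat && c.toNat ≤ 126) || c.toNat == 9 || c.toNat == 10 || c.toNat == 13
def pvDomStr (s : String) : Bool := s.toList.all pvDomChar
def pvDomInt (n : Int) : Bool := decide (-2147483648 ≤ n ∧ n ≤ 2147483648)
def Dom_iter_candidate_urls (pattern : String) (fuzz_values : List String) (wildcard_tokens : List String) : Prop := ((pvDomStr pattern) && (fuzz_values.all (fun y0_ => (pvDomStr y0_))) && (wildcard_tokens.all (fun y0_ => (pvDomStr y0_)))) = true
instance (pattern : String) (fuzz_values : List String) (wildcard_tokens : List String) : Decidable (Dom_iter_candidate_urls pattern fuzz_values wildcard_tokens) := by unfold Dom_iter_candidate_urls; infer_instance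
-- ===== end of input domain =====

-- B replaces A's positions + itertools.product + slice-reassembly '?'-expansion by a single
-- left-to-right scan keeping a list of partial strings (objective: alternative decomposition,
-- same cost). Return-value equivalence; both are generators in Python, compared as the list of
-- yielded values.

-- ===== PORT A =====
-- itertools.product(tokens, repeat=n): leftmost factor varies slowest
def prodRep (tokens : List String) : Nat → List (List String)
  | 0 => [[]]
  | n + 1 => tokens.flatMap (fun t => (prodRep tokens n).map (fun c => t :: c))

-- the parts/prev loop of expand_question_marks plus the final "".join (strings kept as List Char)
def buildParts (cs : List Char) (pcs : List (Int × String)) : List Char :=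
  let st := pcs.foldl
    (fun (st : List (List Char) × Int) pc =>
      (st.1 ++ [PySem.List.slice cs (some st.2) (some pc.1), pc.2.toList], pc.1 + 1))
    ([], 0)
  (st.1 ++ [PySem.List.slice cs (some st.2) none]).flatten

-- expand_question_marks, on the code-point list of the pattern
def expandQM (cs : List Char) (tokens : List String) : List (List Char) :=
  let positions := ((PySem.List.enumerate cs 0).filter (fun p => p.2 == '?')).map (fun p => p.1)
  if positions.isEmpty then [cs]
  else (prodRep tokens positions.length).map (fun combo => buildParts cs (positions.zip combo))

def iter_candidate_urls (pattern : String) (fuzz_values : List String) (wildcard_tokens : List String) : List String :=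
  let has_fuzz := PySem.Str.isIn "FUZZ" pattern
  if has_fuzz && fuzz_values.isEmpty then []  -- Python raises ValueError here; excluded by Pre_
  else
    let bases := if has_fuzz then fuzz_values.map (fun v => PySem.Str.replace pattern "FUZZ" v) else [pattern]
    (bases.foldl
      (fun st base =>
        ((expandQM base.toList wildcard_tokens).map (fun l => String.ofList l)).foldl
          (fun (st : PySem.Set String × List String) cand =>
            if PySem.Set.contains st.1 cand then st
            else (PySem.Set.add st.1 cand, st.2 ++ [cand]))
          st)
      ((PySem.Set.empty : PySem.Set String), ([] : List String))).2

-- ===== PORT B =====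
-- _expand_scan: one pass over the pattern, a list of partial strings as accumulator
def expandScan (cs : List Char) (tokens : List String) : List (List Char) :=
  cs.foldl
    (fun partials c =>
      if c == '?' then partials.flatMap (fun p => tokens.map (fun t => p ++ t.toList))
      else partials.map (fun p => p ++ [c]))
    [[]]

def iter_candidate_urls_alt (pattern : String) (fuzz_values : List String) (wildcard_tokens : List String) : List String :=
  let has_fuzz := PySem.Str.isIn "FUZZ" pattern
  if has_fuzz && fuzz_values.isEmpty then []  -- Python raises ValueError here; excluded by Pre_
  else
    let bases := if has_fuzz then fuzz_values.map (fun v => PySem.Str.replace pattern "FUZZ" v) else [pattern]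
    (bases.foldl
      (fun st base =>
        ((expandScan base.toList wildcard_tokens).map (fun l => String.ofList l)).foldl
          (fun (st : PySem.Set String × List String) cand =>
            if PySem.Set.contains st.1 cand then st
            else (PySem.Set.add st.1 cand, st.2 ++ [cand]))
          st)
      ((PySem.Set.empty : PySem.Set String), ([] : List String))).2

-- ===== PRECONDITION & SPEC =====
-- Pre_ excludes exactly the inputs where Python A raises ValueError: pattern contains "FUZZ" but fuzz_values is empty.
def Pre_iter_candidate_urls (pattern : String) (fuzz_values : List String) (_wildcard_tokens : List String) : Prop :=
  PySem.Str.isIn "FUZZ" pattern = true → fuzz_values ≠ []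
instance (pattern : String) (fuzz_values : List String) (wildcard_tokens : List String) : Decidable (Pre_iter_candidate_urls pattern fuzz_values wildcard_tokens) := by unfold Pre_iter_candidate_urls; infer_instance
def pvWitness_iter_candidate_urls : String × List String × List String := ("http://FUZZ.example/p?q", ["a", "b"], ["0", "1"])

def Spec_iter_candidate_urls (pattern : String) (fuzz_values : List String) (wildcard_tokens : List String) (out : List String) : Prop := out = iter_candidate_urls_alt pattern fuzz_values wildcard_tokens
instance (pattern : String) (fuzz_values : List String) (wildcard_tokens : List String) (out : List String) : Decidable (Spec_iter_candidate_urls pattern fuzz_values wildcard_tokens out) := by unfold Spec_iter_candidate_urls; infer_instance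

-- ===== CLAIM (what is proved, stated in full; the proofs are below) =====
def Claim_equal_iter_candidate_urls : Prop := ∀ (pattern : String) (fuzz_values : List String) (wildcard_tokens : List String), Dom_iter_candidate_urls pattern fuzz_values wildcard_tokens → Pre_iter_candidate_urls pattern fuzz_values wildcard_tokens → Spec_iter_candidate_urls pattern fuzz_values wildcard_tokens (iter_candidate_urls pattern fuzz_values wildcard_tokens)

-- ===== LEMMAS AND PROOFS =====

-- the Nat-valued '?'-positions of cs, counted from start index s
def qpos : List Char → Nat → List Nat
  | [], _ => []
  | c :: cs, s => if c = '?' then s :: qpos cs (s + 1) else qpos cs (s + 1)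

-- pattern with its '?'s filled by the combo, left to right (zip truncation: leftovers stay)
def fillQM : List Char → List String → List Char
  | [], _ => []
  | c :: cs, [] => c :: cs
  | c :: cs, t :: combo => if c = '?' then t.toList ++ fillQM cs combo else c :: fillQM cs (t :: combo)

-- common specification of the expansion, structural on the pattern
def espec (tokens : List String) : List Char → List (List Char)
  | [] => [[]]
  | c :: cs =>
      if c = '?' then tokens.flatMap (fun t => (espec tokens cs).map (fun r => t.toList ++ r))
      else (espec tokens cs).map (fun r => c :: r)

theorem pos_eq (cs : List Char) : ∀ s : Nat,
    ((PySem.List.enumerate cs (s : Int)).filter (fun p => p.2 == '?')).map (fun p => p.1)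
      = (qpos cs s).map (Nat.cast : Nat → Int) := by
  induction cs with
  | nil => intro s; simp [PySem.List.enumerate_nil, qpos]
  | cons c cs ih =>
    intro s
    rw [PySem.List.enumerate_cons, List.filter_cons,
      show ((s : Int) + 1) = ((s + 1 : Nat) : Int) from by push_cast; ring]
    by_cases h : c = '?'
    · subst h
      have hcond : ((((s : Int)), '?').2 == '?') = true := rfl
      rw [if_pos hcond, List.map_cons, ih (s + 1)]
      rw [show qpos ('?' :: cs) s = s :: qpos cs (s + 1) from by simp [qpos], List.map_cons]
    · have hcond : ¬((((s : Int)), c).2 == '?') = true := by simp [h]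
      rw [if_neg hcond, ih (s + 1)]
      rw [show qpos (c :: cs) s = qpos cs (s + 1) from by simp [qpos, h]]

theorem qpos_len (cs : List Char) : ∀ s : Nat, (qpos cs s).length = cs.countP (fun c => c == '?') := by
  induction cs with
  | nil => intro s; simp [qpos]
  | cons c cs ih =>
    intro s
    by_cases h : c = '?' <;> simp [qpos, h, ih]

theorem fill_nil (cs : List Char) : fillQM cs [] = cs := by
  cases cs <;> simp [fillQM]

theorem buildLoop (cs : List Char) : ∀ (cs0 : List Char) (s : Nat) (combo : List String)
    (parts : List (List Char)) (prev : Nat), prev ≤ s → cs0.drop s = cs →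
    (let st := (((qpos cs s).map (Nat.cast : Nat → Int)).zip combo).foldl
        (fun (st : List (List Char) × Int) pc =>
          (st.1 ++ [PySem.List.slice cs0 (some st.2) (some pc.1), pc.2.toList], pc.1 + 1))
        (parts, (prev : Int))
     (st.1 ++ [PySem.List.slice cs0 (some st.2) none]).flatten)
      = parts.flatten ++ ((cs0.drop prev).take (s - prev) ++ fillQM cs combo) := by
  induction cs with
  | nil =>
    intro cs0 s combo parts prev hps hdrop
    have hlen : cs0.length ≤ s := by
      have := List.drop_eq_nil_iff.mp hdrop
      omega
    simp only [qpos, List.map_nil, List.zip_nil_left, List.foldl_nil, fillQM,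
      PySem.List.slice_from_natCast, List.flatten_append, List.flatten_cons,
      List.flatten_nil, List.append_nil]
    rw [List.take_of_length_le (by simp; omega)]
  | cons c cs ih =>
    intro cs0 s combo parts prev hps hdrop
    have hslt : s < cs0.length := by
      by_contra h
      rw [List.drop_eq_nil_iff.mpr (by omega)] at hdrop
      exact (List.cons_ne_nil c cs) hdrop.symm
    have hdrop' : cs0.drop (s + 1) = cs := by
      rw [← List.drop_drop, hdrop]; rfl
    have hsplit : cs0.drop prev = (cs0.drop prev).take (s - prev) ++ c :: cs := by
      conv_lhs => rw [← List.take_append_drop (s - prev) (cs0.drop prev)]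
      rw [List.drop_drop, show prev + (s - prev) = s from by omega, hdrop]
    have htklen : ((cs0.drop prev).take (s - prev)).length = s - prev := by
      simp; omega
    by_cases hc : c = '?'
    · subst hc
      rw [show qpos ('?' :: cs) s = s :: qpos cs (s + 1) from by simp [qpos]]
      cases combo with
      | nil =>
        rw [List.zip_nil_right, List.foldl_nil]
        show (parts ++ [PySem.List.slice cs0 (some ((prev : Nat) : Int)) none]).flatten = _
        rw [PySem.List.slice_from_natCast]
        simp only [List.flatten_append, List.flatten_cons, List.flatten_nil, List.append_nil, fillQM]
        conv_lhs => rw [hsplit]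
      | cons t combo' =>
        rw [List.map_cons, List.zip_cons_cons]
        simp only [List.foldl_cons]
        rw [show (((s : Nat) : Int) + 1) = (((s + 1 : Nat)) : Int) from by push_cast; ring]
        rw [ih cs0 (s + 1) combo'
          (parts ++ [PySem.List.slice cs0 (some ((prev : Nat) : Int)) (some ((s : Nat) : Int)), t.toList])
          (s + 1) (le_refl _) hdrop']
        rw [PySem.List.slice_natCast]
        simp [fillQM, List.append_assoc]
    · rw [show qpos (c :: cs) s = qpos cs (s + 1) from by simp [qpos, hc]]
      rw [ih cs0 (s + 1) combo parts prev (by omega) hdrop']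
      have htake : (cs0.drop prev).take (s + 1 - prev) = (cs0.drop prev).take (s - prev) ++ [c] := by
        rw [show s + 1 - prev = (s - prev) + 1 from by omega]
        conv_lhs => rw [hsplit]
        rw [show s - prev + 1 = ((cs0.drop prev).take (s - prev)).length + 1 from by rw [htklen]]
        rw [List.take_append]
        simp
      rw [htake]
      cases combo with
      | nil => simp [fillQM, fill_nil]
      | cons t combo' => simp [fillQM, hc]

theorem buildParts_eq (cs : List Char) (combo : List String) :
    buildParts cs (((qpos cs 0).map (Nat.cast : Nat → Int)).zip combo) = fillQM cs combo := by
  have := buildLoop cs cs 0 combo [] 0 (le_refl 0) (by simp)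
  simpa [buildParts] using this

theorem prod_fill (tokens : List String) (cs : List Char) :
    (prodRep tokens (cs.countP (fun c => c == '?'))).map (fun combo => fillQM cs combo)
      = espec tokens cs := by
  induction cs with
  | nil => simp [prodRep, fillQM, espec]
  | cons c cs ih =>
    by_cases hc : c = '?'
    · subst hc
      rw [show List.countP (fun c => c == '?') ('?' :: cs)
            = List.countP (fun c => c == '?') cs + 1 from by simp]
      rw [show espec tokens ('?' :: cs)
            = tokens.flatMap (fun t => (espec tokens cs).map (fun r => t.toList ++ r)) from by
          simp [espec]]
      rw [show prodRep tokens (List.countP (fun c => c == '?') cs + 1)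
            = tokens.flatMap (fun t =>
                (prodRep tokens (List.countP (fun c => c == '?') cs)).map (fun co => t :: co))
          from rfl]
      rw [List.map_flatMap, ← ih]
      simp [List.map_map, Function.comp_def, fillQM]
    · rw [show List.countP (fun c => c == '?') (c :: cs)
            = List.countP (fun c => c == '?') cs from by simp [hc]]
      rw [show espec tokens (c :: cs) = (espec tokens cs).map (fun r => c :: r) from by
          simp [espec, hc]]
      rw [← ih, List.map_map]
      apply List.map_congr_left
      intro combo _
      cases combo with
      | nil => simp [fillQM, fill_nil]
      | cons t combo' => simp [fillQM, hc]

theorem expandQM_eq_espec (cs : List Char) (tokens : List String) :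
    expandQM cs tokens = espec tokens cs := by
  unfold expandQM
  rw [show ((0 : Int) = ((0 : Nat) : Int)) from rfl, pos_eq cs 0]
  by_cases h : qpos cs 0 = []
  · have hcnt : cs.countP (fun c => c == '?') = 0 := by
      rw [← qpos_len cs 0, h]; rfl
    have := prod_fill tokens cs
    rw [hcnt] at this
    simp only [prodRep, List.map_cons, List.map_nil] at this
    simp [h, fill_nil] at this ⊢
    exact this
  · have hne : ((qpos cs 0).map (Nat.cast : Nat → Int)).isEmpty = false := by
      simp [h]
    simp only [hne, Bool.false_eq_true, if_false]
    rw [← prod_fill tokens cs, ← qpos_len cs 0]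
    simp only [List.length_map]
    exact List.map_congr_left (fun combo _ => buildParts_eq cs combo)

theorem scan_fold (tokens : List String) (cs : List Char) : ∀ acc : List (List Char),
    cs.foldl
      (fun partials c =>
        if c == '?' then partials.flatMap (fun p => tokens.map (fun t => p ++ t.toList))
        else partials.map (fun p => p ++ [c]))
      acc
    = acc.flatMap (fun p => (espec tokens cs).map (fun r => p ++ r)) := by
  induction cs with
  | nil => intro acc; simp [espec]
  | cons c cs ih =>
    intro acc
    by_cases hc : c = '?'
    · simp only [List.foldl_cons, hc, beq_self_eq_true, if_true, ih, espec]
      simp [List.flatMap_assoc, List.map_flatMap, List.flatMap_map, List.map_map,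
        Function.comp_def, List.append_assoc]
    · have hb : (c == '?') = false := by simp [hc]
      simp only [List.foldl_cons, hb, Bool.false_eq_true, if_false, ih, espec, if_neg hc]
      simp [List.flatMap_map, List.map_map, Function.comp_def]

theorem expand_eq (cs : List Char) (tokens : List String) :
    expandQM cs tokens = expandScan cs tokens := by
  rw [expandQM_eq_espec, expandScan, scan_fold]
  simp

-- ===== VERDICT (by name: the statement is the Claim_ definition above) =====
theorem iter_candidate_urls_spec : Claim_equal_iter_candidate_urls := by
  intro pattern fuzz_values wildcard_tokens _ _
  show _ = _
  unfold iter_candidate_urls iter_candidate_urls_alt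
  simp only [expand_eq]
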